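-- pv_equiv track=rewrite | github.com/rameshpe/ultrasound-analyzer | app.py | format_report_for_chat
-- ===== SOURCE A (Python) =====
-- from typing import List
--
-- REPORT_HEADINGS = [
--     "Image Type",
--     "Major findings",
--     "Root Cause",
--     "Next Steps",
--     "Conclusion",
--     "Disclaimer",
-- ]
--
-- def _normalize_report_lines(report: str) -> List[str]:
--     return [line.strip().replace("**", "") for line in report.splitlines()]
--
-- def format_report_for_chat(report: str) -> str:
--     formatted_lines: List[str] = []
--     for line in _normalize_report_lines(report):
--         if not line:
--             formatted_lines.append("")
--             continue
--
--         matched_heading = None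
--         heading_content = ""
--         for heading in REPORT_HEADINGS:
--             heading_with_colon = f"{heading}:"
--             if line.lower().startswith(heading_with_colon.lower()):
--                 matched_heading = heading
--                 heading_content = line[len(heading_with_colon):].strip()
--                 break
--             if line.lower() == heading.lower():
--                 matched_heading = heading
--                 break
--
--         if matched_heading:
--             if heading_content:
--                 formatted_lines.append(f"**{matched_heading}:** {heading_content}")
--             else:
--                 formatted_lines.append(f"**{matched_heading}:**")
--         else:
--             formatted_lines.append(line)
--
--     return "\n".join(formatted_lines).strip()
-- ===== SOURCE B (Python) =====
-- from typing import List
--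
-- REPORT_HEADINGS = [
--     "Image Type",
--     "Major findings",
--     "Root Cause",
--     "Next Steps",
--     "Conclusion",
--     "Disclaimer",
-- ]
--
-- def format_report_for_chat(report: str) -> str:
--     # Loop interchange: one pass over the document PER HEADING, marking lines as
--     # rendered; an already-rendered line is never overwritten, so each line keeps
--     # its first heading in REPORT_HEADINGS order (same result as a per-line scan).
--     lines = [line.strip().replace("**", "") for line in report.splitlines()]
--     rendered: List = [None] * len(lines)
--     for heading in REPORT_HEADINGS:
--         low_h = heading.lower()
--         pref = low_h + ":"
--         for i, line in enumerate(lines):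
--             if rendered[i] is None and line:
--                 low = line.lower()
--                 if low.startswith(pref):
--                     rest = line[len(pref):].strip()
--                     rendered[i] = f"**{heading}:** {rest}" if rest else f"**{heading}:**"
--                 elif low == low_h:
--                     rendered[i] = f"**{heading}:**"
--     return "\n".join(r if r is not None else line
--                      for r, line in zip(rendered, lines)).strip()
-- ===== Notes on version B (the rewrite author's own statement) =====
-- stated objective: alternative
-- what changed: Loop interchange: A scans the heading list per line with break; B makes one pass over all lines per heading, marking rendered lines in a parallel array and never overwriting, so each line keeps its first heading in list order.
import Mathlib
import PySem

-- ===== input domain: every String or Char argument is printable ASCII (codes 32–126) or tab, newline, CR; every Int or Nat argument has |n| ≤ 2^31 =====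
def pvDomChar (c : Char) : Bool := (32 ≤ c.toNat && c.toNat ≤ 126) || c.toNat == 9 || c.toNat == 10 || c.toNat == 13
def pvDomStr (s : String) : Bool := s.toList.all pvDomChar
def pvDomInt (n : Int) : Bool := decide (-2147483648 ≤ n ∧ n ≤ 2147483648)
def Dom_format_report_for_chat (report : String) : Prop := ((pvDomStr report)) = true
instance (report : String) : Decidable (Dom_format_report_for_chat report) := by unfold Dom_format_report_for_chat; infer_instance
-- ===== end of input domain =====

-- B interchanges the loops: instead of scanning the heading list for every line, it makes one
-- pass over all lines per heading, never overwriting an already-rendered line (objective: alternative).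

-- ===== PORT A =====
-- REPORT_HEADINGS (module constant, shared by both sources)
def pvHeadings : List (List Char) :=
  ["Image Type".toList, "Major findings".toList, "Root Cause".toList,
   "Next Steps".toList, "Conclusion".toList, "Disclaimer".toList]

-- A's inner 'for heading in REPORT_HEADINGS: … break' loop: first match with its content
def pvMatchHeading (line : List Char) : List (List Char) → Option (List Char × List Char)
  | [] => none
  | h :: rest =>
    let hc := h ++ [':']
    if PySem.Chars.startswith (PySem.Chars.lower line) (PySem.Chars.lower hc) then
      some (h, PySem.Chars.strip (PySem.List.slice line (some (hc.length : Int)) none))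
    else if PySem.Chars.lower line = PySem.Chars.lower h then
      some (h, [])
    else pvMatchHeading line rest

-- A's loop body for one normalized line
def pvFormatLineA (line : List Char) : List Char :=
  if line = [] then []
  else
    match pvMatchHeading line pvHeadings with
    | some (h, c) =>
        if c ≠ [] then "**".toList ++ h ++ ":** ".toList ++ c
        else "**".toList ++ h ++ ":**".toList
    | none => line

def format_report_for_chat (report : String) : String :=
  -- _normalize_report_lines
  let lines := (PySem.Chars.splitlines report.toList).map
    (fun l => PySem.Chars.replace (PySem.Chars.strip l) "**".toList "".toList)
  -- for line in …: formatted_lines.append(…)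
  let formatted := lines.foldl (fun acc l => acc ++ [pvFormatLineA l]) []
  String.ofList (PySem.Chars.strip (PySem.Chars.join ['\n'] formatted))

-- ===== PORT B =====
-- B's inner loop body: update one (rendered?, line) cell for heading h
def pvStepB (h : List Char) (p : Option (List Char) × List Char) : Option (List Char) × List Char :=
  match p with
  | (some r, l) => (some r, l)          -- rendered[i] is not None: untouched
  | (none, l) =>
    if l = [] then (none, l)            -- 'and line' falsy: untouched
    else
      let low_h := PySem.Chars.lower h
      let pref := low_h ++ [':']
      let low := PySem.Chars.lower l
      if PySem.Chars.startswith low pref then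
        let rest := PySem.Chars.strip (PySem.List.slice l (some (pref.length : Int)) none)
        (some (if rest ≠ [] then "**".toList ++ h ++ ":** ".toList ++ rest
               else "**".toList ++ h ++ ":**".toList), l)
      else if low = low_h then
        (some ("**".toList ++ h ++ ":**".toList), l)
      else (none, l)

def format_report_for_chat_alt (report : String) : String :=
  let lines := (PySem.Chars.splitlines report.toList).map
    (fun l => PySem.Chars.replace (PySem.Chars.strip l) "**".toList "".toList)
  -- for heading in REPORT_HEADINGS: for i, line in enumerate(lines): …
  let final := pvHeadings.foldl (fun st h => st.map (pvStepB h))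
    (lines.map (fun l => ((none : Option (List Char)), l)))
  String.ofList (PySem.Chars.strip (PySem.Chars.join ['\n']
    (final.map (fun p => p.1.getD p.2))))

-- ===== PRECONDITION & SPEC =====
def Spec_format_report_for_chat (report : String) (out : String) : Prop := out = format_report_for_chat_alt report
instance (report : String) (out : String) : Decidable (Spec_format_report_for_chat report out) := by unfold Spec_format_report_for_chat; infer_instance

-- ===== CLAIM (what is proved, stated in full; the proofs are below) =====
def Claim_equal_format_report_for_chat : Prop := ∀ (report : String), Dom_format_report_for_chat report → Spec_format_report_for_chat report (format_report_for_chat report)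

-- ===== LEMMAS AND PROOFS =====

-- the outer fold of mapped passes = an independent fold on each cell
theorem pvFoldMapComm {α β : Type} (f : β → α → α) (hs : List β) (xs : List α) :
    hs.foldl (fun st h => st.map (f h)) xs = xs.map (fun x => hs.foldl (fun s h => f h s) x) := by
  induction hs generalizing xs with
  | nil => simp
  | cons h t ih =>
    simp only [List.foldl_cons, ih, List.map_map]
    rfl

theorem pvStep_some (h r l) : pvStepB h (some r, l) = (some r, l) := rfl

theorem pvFold_some (hs : List (List Char)) (r l) :
    hs.foldl (fun s h => pvStepB h s) (some r, l) = (some r, l) := by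
  induction hs with
  | nil => rfl
  | cons h t ih => simpa [pvStep_some] using ih

theorem pvLowerCh_colon : PySem.Chars.lowerChar ':' = ':' := by decide

theorem pvLower_append_colon (h : List Char) :
    PySem.Chars.lower (h ++ [':']) = PySem.Chars.lower h ++ [':'] := by
  simp [PySem.Chars.lower, pvLowerCh_colon]

theorem pvLower_length (h : List Char) : (PySem.Chars.lower h).length = h.length := by
  simp [PySem.Chars.lower]

-- one cell, folded over any heading list, computes A's first-match result
theorem pvFoldLine (l : List Char) (hl : l ≠ []) (hs : List (List Char)) :
    hs.foldl (fun s h => pvStepB h s) (none, l) =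
      (match pvMatchHeading l hs with
       | some (h, c) =>
           (some (if c ≠ [] then "**".toList ++ h ++ ":** ".toList ++ c
                  else "**".toList ++ h ++ ":**".toList), l)
       | none => ((none : Option (List Char)), l)) := by
  induction hs with
  | nil => rfl
  | cons h t ih =>
    have hpref : PySem.Chars.lower (h ++ [':']) = PySem.Chars.lower h ++ [':'] :=
      pvLower_append_colon h
    have hlen : (((PySem.Chars.lower h ++ [':']).length : Nat) : Int)
        = (((h ++ [':']).length : Nat) : Int) := by
      simp [pvLower_length]
    simp only [List.foldl_cons]
    by_cases h1 : PySem.Chars.startswith (PySem.Chars.lower l) (PySem.Chars.lower h ++ [':']) = true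
    · have hstep : pvStepB h (none, l) =
          (some (if PySem.Chars.strip (PySem.List.slice l (some (((h ++ [':']).length : Nat) : Int)) none) ≠ []
                 then "**".toList ++ h ++ ":** ".toList ++
                   PySem.Chars.strip (PySem.List.slice l (some (((h ++ [':']).length : Nat) : Int)) none)
                 else "**".toList ++ h ++ ":**".toList), l) := by
        simp only [pvStepB, if_neg hl, h1, if_true, hlen]
      rw [hstep, pvFold_some]
      simp only [pvMatchHeading, hpref ▸ h1, if_true]
    · by_cases h2 : PySem.Chars.lower l = PySem.Chars.lower h
      · have hstep : pvStepB h (none, l) = (some ("**".toList ++ h ++ ":**".toList), l) := by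
          simp only [pvStepB, if_neg hl]
          rw [if_neg h1, if_pos h2]
        rw [hstep, pvFold_some]
        simp only [pvMatchHeading]
        rw [if_neg (hpref ▸ h1), if_pos h2]
        simp
      · have hstep : pvStepB h (none, l) = (none, l) := by
          simp only [pvStepB, if_neg hl]
          rw [if_neg h1, if_neg h2]
        rw [hstep, ih]
        simp only [pvMatchHeading]
        rw [if_neg (hpref ▸ h1), if_neg h2]

theorem pvStep_nil (h : List Char) : pvStepB h (none, ([] : List Char)) = (none, []) := rfl

theorem pvFold_none_nil (hs : List (List Char)) :
    hs.foldl (fun s h => pvStepB h s) (none, ([] : List Char)) = (none, []) := by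
  induction hs with
  | nil => rfl
  | cons h t ih => simpa [pvStep_nil] using ih

-- the cell result, finalized, is A's per-line result
theorem pvCellA (l : List Char) :
    (pvHeadings.foldl (fun s h => pvStepB h s) (none, l)).1.getD
        (pvHeadings.foldl (fun s h => pvStepB h s) (none, l)).2 = pvFormatLineA l := by
  by_cases hl : l = []
  · subst hl
    rw [pvFold_none_nil]
    rfl
  · rw [pvFoldLine l hl pvHeadings]
    unfold pvFormatLineA
    rw [if_neg hl]
    cases pvMatchHeading l pvHeadings with
    | none => rfl
    | some p => cases p; rfl

theorem pvFoldMap (f : List Char → List Char) (xs acc : List (List Char)) :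
    xs.foldl (fun a l => a ++ [f l]) acc = acc ++ xs.map f := by
  induction xs generalizing acc with
  | nil => simp
  | cons x xs ih => simp [ih]

theorem pvAll (xs : List (List Char)) :
    (pvHeadings.foldl (fun st h => st.map (pvStepB h))
        (xs.map (fun l => ((none : Option (List Char)), l)))).map (fun p => p.1.getD p.2)
      = xs.map pvFormatLineA := by
  rw [pvFoldMapComm]
  induction xs with
  | nil => rfl
  | cons x t ih =>
    simp only [List.map_cons]
    refine congrArg₂ List.cons ?_ ih
    show (pvHeadings.foldl (fun s h => pvStepB h s) (none, x)).1.getD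
        (pvHeadings.foldl (fun s h => pvStepB h s) (none, x)).2 = pvFormatLineA x
    exact pvCellA x

theorem format_report_for_chat_spec' (report : String) :
    format_report_for_chat report = format_report_for_chat_alt report := by
  simp only [format_report_for_chat, format_report_for_chat_alt]
  rw [pvFoldMap, pvAll]
  simp only [List.nil_append]

-- ===== VERDICT (by name: the statement is the Claim_ definition above) =====
theorem format_report_for_chat_spec : Claim_equal_format_report_for_chat := by
  intro report _
  show format_report_for_chat report = format_report_for_chat_alt report
  exact format_report_for_chat_spec' report
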